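-- pv_equiv track=rewrite | github.com/Nareeek/Codesignal_tasks | python/#others/robotWalk.py | robotWalk
-- ===== SOURCE A (Python) =====
-- def robotWalk(a):
--     x = y = 0
--     dx = 0
--     dy = 1
--     v = {}
--     v[(x, y)] = True
--     for d in a:
--         for i in range(d):
--             if x + dx < 0 or y + dy < 0:
--                 continue
--             x += dx
--             y += dy
--             if (x, y) in v:
--                 return True
--             v[(x, y)] = True
--         dx, dy = dy, -dx
--     return False
-- ===== SOURCE B (Python) =====
-- def robotWalk(a):
--     # Expand each run in bulk (clamped at negative coordinates), then
--     # detect a revisit by sorting the path and scanning adjacent pairs.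
--     pts = [(0, 0)]
--     x = y = 0
--     for k, d in enumerate(a):
--         dx, dy = ((0, 1), (1, 0), (0, -1), (-1, 0))[k % 4]
--         if dx >= 0 and dy >= 0:
--             m = d
--         else:
--             m = min(d, x if dx < 0 else y)
--         if m < 0:
--             m = 0
--         pts.extend((x + dx * i, y + dy * i) for i in range(1, m + 1))
--         x += dx * m
--         y += dy * m
--     pts.sort()
--     for i in range(1, len(pts)):
--         if pts[i - 1] == pts[i]:
--             return True
--     return False
-- ===== Notes on version B (the rewrite author's own statement) =====
-- stated objective: alternative
-- what changed: B replaces A's per-step simulation with an incremental dict and early return by bulk run expansion: each turn's run length is clamped in closed form (negative-direction runs stop at coordinate 0), the run's cells are generated at once, and a revisit is detected at the end by sorting the whole path and scanning adjacent pairs for an equal neighbour.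
import Mathlib
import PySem

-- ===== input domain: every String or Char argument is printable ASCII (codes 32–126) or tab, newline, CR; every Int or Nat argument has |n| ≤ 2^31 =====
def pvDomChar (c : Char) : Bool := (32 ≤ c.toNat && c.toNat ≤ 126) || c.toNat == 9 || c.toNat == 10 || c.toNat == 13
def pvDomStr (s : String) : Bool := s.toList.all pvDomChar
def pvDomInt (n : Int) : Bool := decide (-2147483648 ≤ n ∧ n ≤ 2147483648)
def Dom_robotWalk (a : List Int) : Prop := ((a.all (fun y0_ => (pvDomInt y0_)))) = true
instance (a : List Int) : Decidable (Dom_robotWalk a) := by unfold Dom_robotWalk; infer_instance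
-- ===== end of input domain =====

-- B replaces A's per-step simulation (incremental dict, early return) by bulk run expansion
-- with closed-form clamping and one final duplicate test; same cost class ("alternative").

-- ===== PORT A =====
-- A's dict v is consulted only through '(x, y) in v' and written by 'v[(x, y)] = True':
-- its insertion order is never observed, so it is ported as a hash map (exact for the
-- return value on every input; assignment = insert, membership = lookup isSome).
-- for i in range(d): ... (inner loop; 'continue' when the next step would go negative;
-- returns none where the Python returns True, otherwise the updated x, y, v)
def robotStep (n : Nat) (x y dx dy : Int) (v : Std.HashMap (Int × Int) Bool) :
    Option (Int × Int × Std.HashMap (Int × Int) Bool) :=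
  match n with
  | 0 => some (x, y, v)
  | Nat.succ n' =>
    if x + dx < 0 ∨ y + dy < 0 then robotStep n' x y dx dy v
    else if (v[((x + dx, y + dy) : Int × Int)]?).isSome then none
    else robotStep n' (x + dx) (y + dy) dx dy (v.insert (x + dx, y + dy) true)

-- for d in a: ...  with dx, dy = dy, -dx after each run
def robotLoop : List Int → Int → Int → Int → Int → Std.HashMap (Int × Int) Bool → Bool
  | [], _, _, _, _, _ => false
  | d :: rest, x, y, dx, dy, v =>
    match robotStep d.toNat x y dx dy v with
    | none => true
    | some (x', y', v') => robotLoop rest x' y' dy (-dx) v'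

def robotWalk (a : List Int) : Bool :=
  robotLoop a 0 0 0 1 ((∅ : Std.HashMap (Int × Int) Bool).insert ((0 : Int), (0 : Int)) true)

-- ===== PORT B =====
-- ((0,1),(1,0),(0,-1),(-1,0))[k % 4]
def dirOf (k : Nat) : Int × Int :=
  match k % 4 with
  | 0 => (0, 1)
  | 1 => (1, 0)
  | 2 => (0, -1)
  | _ => (-1, 0)

-- pts.extend((x + dx*i, y + dy*i) for i in range(1, m+1))
def runCells (x y dx dy : Int) (m : Nat) : List (Int × Int) :=
  (List.range' 1 m).map (fun (i : Nat) => (x + dx * (i : Int), y + dy * (i : Int)))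

-- the 'for k, d in enumerate(a)' loop of Source B, accumulating pts
def buildPath : List Int → Nat → Int → Int → List (Int × Int) → List (Int × Int)
  | [], _, _, _, pts => pts
  | d :: rest, k, x, y, pts =>
    let dir := dirOf k
    let m0 : Int := if 0 ≤ dir.1 ∧ 0 ≤ dir.2 then d else min d (if dir.1 < 0 then x else y)
    let m : Nat := (if m0 < 0 then 0 else m0).toNat
    buildPath rest (k + 1) (x + dir.1 * m) (y + dir.2 * m) (pts ++ runCells x y dir.1 dir.2 m)

-- Python's tuple comparison p <= q (lexicographic), used by pts.sort()
def pairLE (p q : Int × Int) : Bool := p.1 < q.1 || (p.1 == q.1 && p.2 ≤ q.2)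

-- the scan 'for i in range(1, len(pts)): if pts[i-1] == pts[i]: return True' over the
-- sorted list, as structural recursion on adjacent pairs (exact: same comparisons, in order)
def hasAdjDup : List (Int × Int) → Bool
  | [] => false
  | [_] => false
  | p :: q :: t => if p == q then true else hasAdjDup (q :: t)

def robotWalk_alt (a : List Int) : Bool :=
  let pts := buildPath a 0 0 0 [((0 : Int), (0 : Int))]
  hasAdjDup (pts.mergeSort pairLE)   -- pts.sort(); adjacent-pair scan

-- ===== PRECONDITION & SPEC =====
def Spec_robotWalk (a : List Int) (out : Bool) : Prop := out = robotWalk_alt a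
instance (a : List Int) (out : Bool) : Decidable (Spec_robotWalk a out) := by unfold Spec_robotWalk; infer_instance

-- ===== CLAIM (what is proved, stated in full; the proofs are below) =====
def Claim_equal_robotWalk : Prop := ∀ (a : List Int), Dom_robotWalk a → Spec_robotWalk a (robotWalk a)

-- ===== LEMMAS AND PROOFS =====

-- the four unit directions the walk can take
def IsDir (dx dy : Int) : Prop :=
  (dx, dy) = ((0 : Int), (1 : Int)) ∨ (dx, dy) = ((1 : Int), (0 : Int)) ∨
  (dx, dy) = ((0 : Int), (-1 : Int)) ∨ (dx, dy) = ((-1 : Int), (0 : Int))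

-- number of steps A actually takes in a run of (at most) n steps
def effM (n : Nat) (x y dx dy : Int) : Nat :=
  if dx < 0 then min n x.toNat else if dy < 0 then min n y.toNat else n

def insAll (v : Std.HashMap (Int × Int) Bool) (cs : List (Int × Int)) :
    Std.HashMap (Int × Int) Bool :=
  cs.foldl (fun w c => w.insert c true) v

theorem dirOf_isDir (k : Nat) : IsDir (dirOf k).1 (dirOf k).2 := by
  have h : k % 4 = 0 ∨ k % 4 = 1 ∨ k % 4 = 2 ∨ k % 4 = 3 := by omega
  rcases h with h | h | h | h <;> simp [dirOf, h, IsDir]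

theorem dirOf_succ (k : Nat) : dirOf (k + 1) = ((dirOf k).2, -(dirOf k).1) := by
  have h : k % 4 = 0 ∨ k % 4 = 1 ∨ k % 4 = 2 ∨ k % 4 = 3 := by omega
  have h1 : (k + 1) % 4 = (k % 4 + 1) % 4 := by omega
  rcases h with h | h | h | h <;> simp [dirOf, h, h1]

theorem runCells_zero (x y dx dy : Int) : runCells x y dx dy 0 = [] := rfl

theorem runCells_succ (x y dx dy : Int) (m : Nat) :
    runCells x y dx dy (m + 1) =
      (x + dx, y + dy) :: runCells (x + dx) (y + dy) dx dy m := by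
  unfold runCells
  rw [List.range'_succ]
  simp only [List.range'_eq_map_range, List.map_cons, List.map_map]
  refine List.cons_eq_cons.mpr ⟨by norm_num, ?_⟩
  apply List.map_congr_left
  intro i _
  simp only [Function.comp_apply]
  rw [Prod.ext_iff]
  constructor <;> (push_cast; ring)

theorem mem_runCells (c : Int × Int) (x y dx dy : Int) (m : Nat) :
    c ∈ runCells x y dx dy m ↔
      ∃ i : Nat, 1 ≤ i ∧ i < 1 + m ∧ c = (x + dx * i, y + dy * i) := by
  simp only [runCells, List.mem_map, List.mem_range'_1]
  constructor
  · rintro ⟨i, ⟨h1, h2⟩, rfl⟩; exact ⟨i, h1, h2, rfl⟩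
  · rintro ⟨i, h1, h2, rfl⟩; exact ⟨i, ⟨h1, h2⟩, rfl⟩

theorem self_not_mem_runCells (hdir : IsDir dx dy) (x y : Int) (m : Nat) :
    (x, y) ∉ runCells x y dx dy m := by
  rw [mem_runCells]
  rintro ⟨i, h1, _, hc⟩
  have hx : x = x + dx * i := congrArg Prod.fst hc
  have hy : y = y + dy * i := congrArg Prod.snd hc
  have hi : (1 : Int) ≤ (i : Int) := by exact_mod_cast h1
  rcases hdir with h | h | h | h <;>
    (injection h with e1 e2; subst e1; subst e2; omega)

theorem nodup_runCells (hdir : IsDir dx dy) (x y : Int) (m : Nat) :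
    (runCells x y dx dy m).Nodup := by
  unfold runCells
  apply List.Nodup.map _ (List.nodup_range' )
  intro i j hij
  have hx := congrArg Prod.fst hij
  have hy := congrArg Prod.snd hij
  simp only at hx hy
  rcases hdir with h | h | h | h <;>
    (injection h with e1 e2; subst e1; subst e2; omega)

theorem any_congr_bool {α : Type} (l : List α) (f g : α → Bool)
    (h : ∀ x ∈ l, f x = g x) : l.any f = l.any g := by
  induction l with
  | nil => rfl
  | cons a t ih =>
    simp only [List.any_cons]
    rw [h a (by simp), ih (fun x hx => h x (by simp [hx]))]

theorem get?_insAll (cs : List (Int × Int)) :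
    ∀ (v : Std.HashMap (Int × Int) Bool) (p : Int × Int),
      ((insAll v cs)[p]?).isSome = ((v[p]?).isSome || decide (p ∈ cs)) := by
  induction cs with
  | nil => intro v p; simp [insAll]
  | cons c t ih =>
    intro v p
    have : insAll v (c :: t) = insAll (v.insert c true) t := rfl
    rw [this, ih]
    rw [Std.HashMap.getElem?_insert]
    by_cases hpc : p = c
    · subst hpc
      simp
    · rw [if_neg (by simp [Ne.symm hpc])]
      simp [List.mem_cons, hpc]

theorem stepA_eq {dx dy : Int} (hdir : IsDir dx dy) :
    ∀ (n : Nat) (x y : Int) (v : Std.HashMap (Int × Int) Bool), 0 ≤ x → 0 ≤ y →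
      robotStep n x y dx dy v =
        (if (runCells x y dx dy (effM n x y dx dy)).any (fun c => (v[c]?).isSome) then none
         else some (x + dx * (effM n x y dx dy : Int), y + dy * (effM n x y dx dy : Int),
                    insAll v (runCells x y dx dy (effM n x y dx dy)))) := by
  intro n
  induction n with
  | zero =>
    intro x y v hx hy
    have hm : effM 0 x y dx dy = 0 := by unfold effM; split_ifs <;> simp
    rw [hm]
    simp [robotStep, runCells_zero, insAll]
  | succ n ih =>
    intro x y v hx hy
    by_cases hneg : x + dx < 0 ∨ y + dy < 0
    · -- the clamp case: the whole remaining run is skipped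
      have hm1 : effM (n + 1) x y dx dy = 0 := by
        rcases hdir with h | h | h | h <;>
          (injection h with e1 e2; subst e1; subst e2; unfold effM; simp <;> omega)
      have hm2 : effM n x y dx dy = 0 := by
        rcases hdir with h | h | h | h <;>
          (injection h with e1 e2; subst e1; subst e2; unfold effM; simp <;> omega)
      have hstep : robotStep (n + 1) x y dx dy v = robotStep n x y dx dy v := by
        simp [robotStep, hneg]
      rw [hstep, ih x y v hx hy, hm1, hm2]
    · have hxd : 0 ≤ x + dx := by omega
      have hyd : 0 ≤ y + dy := by omega
      have hm : effM (n + 1) x y dx dy = effM n (x + dx) (y + dy) dx dy + 1 := by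
        rcases hdir with h | h | h | h <;>
          (injection h with e1 e2; subst e1; subst e2; unfold effM; simp <;> omega)
      rw [hm, runCells_succ]
      by_cases hhit : (v[((x + dx, y + dy) : Int × Int)]?).isSome
      · simp only [robotStep]
        rw [if_neg (by omega)]
        simp [hhit]
      · have hstep : robotStep (n + 1) x y dx dy v =
            robotStep n (x + dx) (y + dy) dx dy (v.insert (x + dx, y + dy) true) := by
          simp [robotStep, hhit]
          intro h
          rcases h with h | h <;> omega
        rw [hstep, ih (x + dx) (y + dy) _ hxd hyd]
        have hcong : (runCells (x + dx) (y + dy) dx dy (effM n (x + dx) (y + dy) dx dy)).any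
              (fun c => (((v.insert (x + dx, y + dy) true)[c]?).isSome)) =
            (runCells (x + dx) (y + dy) dx dy (effM n (x + dx) (y + dy) dx dy)).any
              (fun c => ((v[c]?).isSome)) := by
          apply any_congr_bool
          intro c hc
          have hne : c ≠ (x + dx, y + dy) := by
            intro h; subst h
            exact self_not_mem_runCells hdir (x + dx) (y + dy) _ hc
          rw [Std.HashMap.getElem?_insert, if_neg (by simp [Ne.symm hne])]
        rw [hcong]
        simp only [List.any_cons, hhit, Bool.false_or]
        split_ifs with h
        · rfl
        · have hins : insAll v ((x + dx, y + dy) ::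
              runCells (x + dx) (y + dy) dx dy (effM n (x + dx) (y + dy) dx dy)) =
              insAll (v.insert (x + dx, y + dy) true)
                (runCells (x + dx) (y + dy) dx dy (effM n (x + dx) (y + dy) dx dy)) := rfl
          rw [hins]
          congr 1 <;> push_cast <;> ring_nf

theorem buildPath_append (rest : List Int) :
    ∀ (k : Nat) (x y : Int) (p q : List (Int × Int)),
      buildPath rest k x y (p ++ q) = p ++ buildPath rest k x y q := by
  induction rest with
  | nil => intro k x y p q; rfl
  | cons d t ih =>
    intro k x y p q
    simp only [buildPath]
    rw [List.append_assoc, ih]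

theorem pairLE_trans : ∀ (a b c : Int × Int),
    pairLE a b = true → pairLE b c = true → pairLE a c = true := by
  rintro ⟨a1, a2⟩ ⟨b1, b2⟩ ⟨c1, c2⟩
  simp only [pairLE, Bool.or_eq_true, Bool.and_eq_true, decide_eq_true_eq, beq_iff_eq]
  omega

theorem pairLE_total : ∀ (a b : Int × Int), (pairLE a b || pairLE b a) = true := by
  rintro ⟨a1, a2⟩ ⟨b1, b2⟩
  simp only [pairLE, Bool.or_eq_true, Bool.and_eq_true, decide_eq_true_eq, beq_iff_eq]
  omega

theorem pairLE_antisymm {a b : Int × Int}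
    (h1 : pairLE a b = true) (h2 : pairLE b a = true) : a = b := by
  obtain ⟨a1, a2⟩ := a
  obtain ⟨b1, b2⟩ := b
  simp only [pairLE, Bool.or_eq_true, Bool.and_eq_true, decide_eq_true_eq, beq_iff_eq] at h1 h2
  rw [Prod.mk.injEq]
  omega

-- on a list sorted by pairLE, an adjacent equal pair is the same as a duplicate
theorem adj_dup (s : List (Int × Int))
    (hs : s.Pairwise (fun a b => pairLE a b = true)) :
    hasAdjDup s = decide (¬ s.Nodup) := by
  induction s with
  | nil => simp [hasAdjDup]
  | cons a t ih =>
    cases t with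
    | nil => simp [hasAdjDup]
    | cons b u =>
      rw [List.pairwise_cons] at hs
      obtain ⟨hha, hs'⟩ := hs
      have hrest := ih hs'
      simp only [hasAdjDup] at hrest ⊢
      rw [hrest]
      by_cases hab : a = b
      · subst hab
        have : ¬ (a :: a :: u).Nodup := by simp
        simp [this]
      · rw [if_neg (by simp [hab])]
        have hiff : (a :: b :: u).Nodup ↔ (b :: u).Nodup := by
          constructor
          · exact fun h => h.of_cons
          · intro h
            refine List.Nodup.cons ?_ h
            intro hmem
            rcases List.mem_cons.mp hmem with h2 | h2
            · exact hab h2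
            · -- a occurs later in u: pairLE b a from sortedness, pairLE a b from the head
              have hba : pairLE b a = true := (List.pairwise_cons.mp hs').1 a h2
              have hab' : pairLE a b = true := hha b (by simp)
              exact hab (pairLE_antisymm hab' hba)
        simp [hiff]

theorem alt_eq_nodup (a : List Int) :
    robotWalk_alt a = decide (¬ (buildPath a 0 0 0 [((0 : Int), (0 : Int))]).Nodup) := by
  unfold robotWalk_alt
  rw [adj_dup _ (List.pairwise_mergeSort pairLE_trans pairLE_total _)]
  rw [decide_eq_decide]
  exact not_congr (List.mergeSort_perm _ pairLE).nodup_iff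

theorem loop_eq (rest : List Int) :
    ∀ (k : Nat) (x y : Int) (v : Std.HashMap (Int × Int) Bool) (pts : List (Int × Int)),
      0 ≤ x → 0 ≤ y → pts.Nodup →
      (∀ p, ((v[p]?).isSome) = decide (p ∈ pts)) →
      robotLoop rest x y (dirOf k).1 (dirOf k).2 v =
        decide (¬ (buildPath rest k x y pts).Nodup) := by
  induction rest with
  | nil =>
    intro k x y v pts hx hy hnd hv
    simp [robotLoop, buildPath, hnd]
  | cons d t ih =>
    intro k x y v pts hx hy hnd hv
    have hdir := dirOf_isDir k
    simp only [robotLoop, buildPath]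
    rw [stepA_eq hdir d.toNat x y v hx hy]
    -- B's run length equals A's effective step count
    have hm : ((if (if 0 ≤ (dirOf k).1 ∧ 0 ≤ (dirOf k).2 then d
          else min d (if (dirOf k).1 < 0 then x else y)) < 0 then 0
          else (if 0 ≤ (dirOf k).1 ∧ 0 ≤ (dirOf k).2 then d
          else min d (if (dirOf k).1 < 0 then x else y))).toNat)
          = effM d.toNat x y (dirOf k).1 (dirOf k).2 := by
      rcases hdir with h | h | h | h <;>
        · rw [Prod.ext_iff] at h
          obtain ⟨e1, e2⟩ := h
          simp only at e1 e2
          rw [e1, e2]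
          unfold effM
          norm_num
          omega
    simp only [hm]
    set m := effM d.toNat x y (dirOf k).1 (dirOf k).2 with hmdef
    set cs := runCells x y (dirOf k).1 (dirOf k).2 m with hcs
    by_cases hhit : cs.any (fun c => ((v[c]?).isSome))
    · simp only [hhit, if_true]
      -- some cell is revisited: the full path has a duplicate
      obtain ⟨c, hcmem, hcv⟩ := List.any_eq_true.mp hhit
      have hcpts : c ∈ pts := by
        have := hv c
        rw [hcv] at this
        exact of_decide_eq_true this.symm
      have hdup : ¬ (pts ++ cs).Nodup := by
        rw [List.nodup_append]
        rintro ⟨-, -, hdisj⟩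
        exact hdisj c hcpts c hcmem rfl
      have hfull : ¬ (buildPath t (k + 1) (x + (dirOf k).1 * m) (y + (dirOf k).2 * m)
          (pts ++ cs)).Nodup := by
        intro hnodup
        apply hdup
        have := buildPath_append t (k + 1) (x + (dirOf k).1 * m) (y + (dirOf k).2 * m)
          (pts ++ cs) []
        rw [List.append_nil] at this
        rw [this] at hnodup
        exact hnodup.of_append_left
      simp [hfull]
    · simp only [hhit, if_false]
      -- no revisit in this run: recurse with the extended path
      rw [Bool.not_eq_true] at hhit
      have hfresh : ∀ c ∈ cs, c ∉ pts := by
        intro c hc hcp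
        have h1 := (List.any_eq_false.mp hhit) c hc
        rw [hv c] at h1
        exact h1 (decide_eq_true hcp)
      have hx' : 0 ≤ x + (dirOf k).1 * m := by
        rcases hdir with h | h | h | h <;>
          · rw [Prod.ext_iff] at h
            obtain ⟨e1, e2⟩ := h
            simp only at e1 e2
            simp only [e1, e2] at hmdef ⊢
            unfold effM at hmdef
            try norm_num at hmdef
            omega
      have hy' : 0 ≤ y + (dirOf k).2 * m := by
        rcases hdir with h | h | h | h <;>
          · rw [Prod.ext_iff] at h
            obtain ⟨e1, e2⟩ := h
            simp only at e1 e2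
            simp only [e1, e2] at hmdef ⊢
            unfold effM at hmdef
            try norm_num at hmdef
            omega
      have hnd' : (pts ++ cs).Nodup := by
        rw [List.nodup_append]
        exact ⟨hnd, nodup_runCells hdir x y m, fun a ha b hb hab => hfresh b hb (hab ▸ ha)⟩
      have hv' : ∀ p, (((insAll v cs)[p]?).isSome) = decide (p ∈ pts ++ cs) := by
        intro p
        rw [get?_insAll, hv]
        simp [List.mem_append]
      have hrec := ih (k + 1) (x + (dirOf k).1 * m) (y + (dirOf k).2 * m)
        (insAll v cs) (pts ++ cs) hx' hy' hnd' hv'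
      rw [dirOf_succ] at hrec
      simp only at hrec
      exact hrec

-- ===== VERDICT (by name: the statement is the Claim_ definition above) =====
theorem robotWalk_spec : Claim_equal_robotWalk := by
  intro a _hdom
  unfold Spec_robotWalk
  rw [alt_eq_nodup]
  unfold robotWalk
  have h0 : (dirOf 0) = ((0 : Int), (1 : Int)) := rfl
  have hv : ∀ p, ((((∅ : Std.HashMap (Int × Int) Bool).insert ((0 : Int), (0 : Int)) true)[p]?).isSome) =
      decide (p ∈ [((0 : Int), (0 : Int))]) := by
    intro p
    rw [Std.HashMap.getElem?_insert]
    by_cases hp : p = ((0 : Int), (0 : Int))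
    · subst hp; simp
    · rw [if_neg (by simp [Ne.symm hp])]
      simp [hp]
  have := loop_eq a 0 0 0 ((∅ : Std.HashMap (Int × Int) Bool).insert ((0 : Int), (0 : Int)) true)
    [((0 : Int), (0 : Int))] (le_refl 0) (le_refl 0) (by simp) hv
  rw [h0] at this
  exact this
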